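-- pv_equiv track=rewrite | github.com/Julientalbot/hermes-agent | tools/x_search_tool.py | _normalize_handles
-- ===== SOURCE A (Python) =====
-- from typing import Any, Dict, List, Optional
--
-- MAX_HANDLES = 10
--
-- def _normalize_handles(
--     handles: Optional[List[str]], field_name: str
-- ) -> List[str]:
--     """Strip @ prefixes, deduplicate, enforce MAX_HANDLES."""
--     if not handles:
--         return []
--     cleaned: List[str] = []
--     seen: set = set()
--     for h in handles:
--         if not isinstance(h, str):
--             continue
--         handle = h.strip().lstrip("@")
--         if not handle or handle in seen:
--             continue
--         seen.add(handle)
--         cleaned.append(handle)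
--         if len(cleaned) >= MAX_HANDLES:
--             break
--     return cleaned
-- ===== SOURCE B (Python) =====
-- from typing import List, Optional
--
-- MAX_HANDLES = 10
--
-- def _normalize_handles(handles: Optional[List[str]], field_name: str) -> List[str]:
--     """Selection-style: up to MAX_HANDLES rounds, each emits the first remaining
--     cleaned token and purges all of its later duplicates (no seen-set, no dedup table)."""
--     pending = [t for t in (h.strip().lstrip("@") for h in handles or [] if isinstance(h, str)) if t]
--     out: List[str] = []
--     while pending and len(out) < MAX_HANDLES:
--         head = pending[0]
--         out.append(head)
--         pending = [t for t in pending[1:] if t != head]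
--     return out
-- ===== Notes on version B (the rewrite author's own statement) =====
-- stated objective: alternative
-- what changed: Replaces A's single interleaved pass over the input with a mutable seen-set and early break by a selection-style loop: clean the tokens once, then run at most MAX_HANDLES rounds, each emitting the first remaining token and filtering all of its later duplicates out of the pending list, so no seen-set or dedup table exists at all.
import Mathlib
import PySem

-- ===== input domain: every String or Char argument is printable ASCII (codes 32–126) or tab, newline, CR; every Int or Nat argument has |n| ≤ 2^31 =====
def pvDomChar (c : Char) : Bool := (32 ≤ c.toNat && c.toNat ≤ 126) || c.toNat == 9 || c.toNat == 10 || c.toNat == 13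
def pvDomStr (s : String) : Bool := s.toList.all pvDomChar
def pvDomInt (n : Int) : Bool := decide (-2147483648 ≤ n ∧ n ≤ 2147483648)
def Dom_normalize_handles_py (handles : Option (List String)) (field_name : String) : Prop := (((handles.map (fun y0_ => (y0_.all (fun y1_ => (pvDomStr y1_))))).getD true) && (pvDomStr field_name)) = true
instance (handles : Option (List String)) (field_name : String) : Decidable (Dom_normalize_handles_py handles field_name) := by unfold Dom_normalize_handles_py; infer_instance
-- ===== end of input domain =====

-- B replaces A's interleaved seen-set pass with a selection-style loop (≤ MAX_HANDLES rounds, each emits the first pending token and filters out its duplicates); objective: alternative.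


-- h.strip().lstrip("@"): strip via PySem; the '@'-only lstrip is ported by hand as dropWhile (exact: it drops exactly the leading '@' characters)
def pvClean (h : String) : String :=
  String.ofList ((PySem.Str.strip h).toList.dropWhile (· == '@'))

-- ===== PORT A =====
def pvLoopA : List String → PySem.Set String → List String → List String
  | [], _, cleaned => cleaned
  | h :: rest, seen, cleaned =>
    let handle := pvClean h
    if handle = "" then pvLoopA rest seen cleaned
    else if PySem.Set.contains seen handle then pvLoopA rest seen cleaned
    else
      let seen' := PySem.Set.add seen handle
      let cleaned' := cleaned ++ [handle]
      if 10 ≤ cleaned'.length then cleaned' else pvLoopA rest seen' cleaned'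

def normalize_handles_py (handles : Option (List String)) (field_name : String) : List String :=
  match handles with
  | none => []
  | some hs => if hs = [] then [] else pvLoopA hs PySem.Set.empty []

-- ===== PORT B =====
-- the while loop of Source B: out grows, pending shrinks (duplicates of the emitted head are filtered away)
def pvBLoop (pending out : List String) : List String :=
  match pending with
  | [] => out
  | head :: rest =>
    if out.length < 10 then pvBLoop (rest.filter (· ≠ head)) (out ++ [head])
    else out
termination_by pending.length
decreasing_by simp; exact (List.length_filter_le _ _).trans (by simp)

def normalize_handles_py_alt (handles : Option (List String)) (field_name : String) : List String :=
  let pending := ((handles.getD []).map pvClean).filter (fun t => t ≠ "")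
  pvBLoop pending []

-- ===== PRECONDITION & SPEC =====
def Spec_normalize_handles_py (handles : Option (List String)) (field_name : String) (out : List String) : Prop := out = normalize_handles_py_alt handles field_name
instance (handles : Option (List String)) (field_name : String) (out : List String) : Decidable (Spec_normalize_handles_py handles field_name out) := by unfold Spec_normalize_handles_py; infer_instance

-- ===== CLAIM (what is proved, stated in full; the proofs are below) =====
def Claim_equal_normalize_handles_py : Prop := ∀ (handles : Option (List String)) (field_name : String), Dom_normalize_handles_py handles field_name → Spec_normalize_handles_py handles field_name (normalize_handles_py handles field_name)

-- ===== LEMMAS AND PROOFS =====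

-- uncapped nub-by-filtering: the common normal form both loops are reduced to
def pvNub : List String → List String
  | [] => []
  | t :: ts => t :: pvNub (ts.filter (· ≠ t))
termination_by xs => xs.length
decreasing_by simp; exact (List.length_filter_le _ _).trans (by simp)

-- ordered first-occurrence dedup relative to an accumulator of already-seen tokens
def pvDedupFrom (acc : List String) : List String → List String
  | [] => []
  | t :: ts => if t ∈ acc then pvDedupFrom acc ts else t :: pvDedupFrom (acc ++ [t]) ts

lemma pvDedupFrom_eq_nub (xs : List String) : ∀ acc : List String,
    pvDedupFrom acc xs = pvNub (xs.filter (fun t => decide (t ∉ acc))) := by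
  induction xs with
  | nil => intro acc; rw [pvNub.eq_def]; simp [pvDedupFrom]
  | cons t ts ih =>
    intro acc
    by_cases hm : t ∈ acc
    · simp [pvDedupFrom, hm, ih]
    · have hcons : (t :: ts).filter (fun s => decide (s ∉ acc)) =
          t :: ts.filter (fun s => decide (s ∉ acc)) := by simp [hm]
      rw [hcons, pvNub.eq_def]
      simp only [pvDedupFrom, if_neg hm]
      have hff : (ts.filter (fun s => decide (s ∉ acc))).filter (fun s => decide (s ≠ t)) =
          ts.filter (fun s => decide (s ∉ acc ++ [t])) := by
        rw [List.filter_filter]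
        apply List.filter_congr
        intro s _
        simp [List.mem_append]
        exact Bool.and_comm _ _
      rw [hff, ih]

lemma pvBLoop_eq (pending : List String) : ∀ out : List String,
    pvBLoop pending out = out ++ (pvNub pending).take (10 - out.length) := by
  induction pending using pvNub.induct with
  | case1 => intro out; rw [pvBLoop.eq_def, pvNub.eq_def]; simp
  | case2 t ts ih =>
    rw [show (List.filter (fun (x : {y // y ∈ ts}) => decide ((x : String) ≠ t)) ts.attach).unattach
        = ts.filter (fun x => decide (x ≠ t)) from by
      rw [List.unattach_filter (g := fun x => decide (x ≠ t)) (hf := fun x h => rfl),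
        List.unattach_attach]] at ih
    intro out
    rw [pvBLoop.eq_def, pvNub.eq_def]
    by_cases h : out.length < 10
    · simp only [h, if_true]
      rw [ih]
      have hsucc : 10 - out.length = (10 - (out ++ [t]).length) + 1 := by
        simp; omega
      rw [hsucc, List.take_succ_cons]
      simp
    · have h0 : 10 - out.length = 0 := by omega
      simp [h, h0]

lemma pvLoopA_eq (ts : List String) : ∀ cleaned : List String, cleaned.length < 10 →
    pvLoopA ts cleaned cleaned =
      (cleaned ++ pvDedupFrom cleaned ((ts.map pvClean).filter (fun t => t ≠ ""))).take 10 := by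
  induction ts with
  | nil =>
    intro cleaned hlen
    simp [pvLoopA, pvDedupFrom, List.take_of_length_le (Nat.le_of_lt hlen)]
  | cons h rest ih =>
    intro cleaned hlen
    by_cases he : pvClean h = ""
    · simp [pvLoopA, he, ih cleaned hlen]
    · by_cases hm : pvClean h ∈ cleaned
      · have hc : PySem.Set.contains cleaned (pvClean h) = true := by
          simp [PySem.Set.contains, hm]
        simp [pvLoopA, he, hc, pvDedupFrom, hm, ih cleaned hlen]
      · have hc : PySem.Set.contains cleaned (pvClean h) = false := by
          simp [PySem.Set.contains, hm]
        have hadd : PySem.Set.add cleaned (pvClean h) = cleaned ++ [pvClean h] := by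
          simp [PySem.Set.add, PySem.Set.contains, hm]
        by_cases hten : 10 ≤ (cleaned ++ [pvClean h]).length
        · have h10 : (cleaned ++ [pvClean h]).length = 10 := by
            simp at hten ⊢; omega
          have htake : ∀ X : List String,
              ((cleaned ++ [pvClean h]) ++ X).take 10 = cleaned ++ [pvClean h] := by
            intro X; exact List.take_left' h10
          have hfil : List.filter (fun t => decide (t ≠ "")) (List.map pvClean (h :: rest)) =
              pvClean h :: List.filter (fun t => decide (t ≠ "")) (List.map pvClean rest) := by
            simp [he]
          rw [hfil]
          simp only [pvDedupFrom, if_neg hm]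
          rw [List.append_cons, htake]
          have h9 : 9 ≤ cleaned.length := by simp at h10; omega
          simp [pvLoopA, he, hm, h9]
        · have hlt : (cleaned ++ [pvClean h]).length < 10 := Nat.lt_of_not_le hten
          simp only [pvLoopA, he, hc, hadd, if_neg he, hten, if_false, Bool.false_eq_true,
            if_neg hten]
          rw [ih (cleaned ++ [pvClean h]) hlt]
          simp [pvDedupFrom, he, hm]

-- ===== VERDICT (by name: the statement is the Claim_ definition above) =====
theorem normalize_handles_py_spec : Claim_equal_normalize_handles_py := by
  intro handles field_name _
  unfold Spec_normalize_handles_py normalize_handles_py normalize_handles_py_alt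
  match handles with
  | none => rw [pvBLoop.eq_def]; simp
  | some hs =>
    by_cases hnil : hs = []
    · rw [hnil]; rw [pvBLoop.eq_def]; simp
    · simp only [hnil, if_false, Option.getD_some]
      rw [pvBLoop_eq]
      have := pvLoopA_eq hs [] (by norm_num)
      rw [show (pvLoopA hs PySem.Set.empty [] = pvLoopA hs [] []) from rfl, this,
        pvDedupFrom_eq_nub]
      simp
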